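-- pv_equiv track=rewrite | github.com/brunoyin/test-drive | python/algo/interview_q1.py | get_requiredtime
-- ===== SOURCE A (Python) =====
-- def get_requiredtime(parts):
--     total_time = 0
--     remaining_parts = parts
--     while len(remaining_parts) > 1:
--         x1 = remaining_parts[0]
--         x2 = remaining_parts[1]
--         new_parts = x1 + x2
--         total_time += x1 + x2
--         if len(remaining_parts) == 2:
--             # you just finished
--             break
--         remaining_parts = [new_parts] + remaining_parts[2:]
--     return total_time
-- ===== SOURCE B (Python) =====
-- def get_requiredtime(parts):
--     if not parts:
--         return 0
--     total = 0
--     run = parts[0]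
--     for x in parts[1:]:
--         run += x
--         total += run
--     return total
-- ===== Notes on version B (the rewrite author's own statement) =====
-- stated objective: faster
-- what changed: Replaced the quadratic rebuild-the-list loop (each step concatenates a fresh list [x1+x2]+rest) with a single pass that keeps a running prefix sum and adds it to the total for every element after the first.
import Mathlib
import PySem

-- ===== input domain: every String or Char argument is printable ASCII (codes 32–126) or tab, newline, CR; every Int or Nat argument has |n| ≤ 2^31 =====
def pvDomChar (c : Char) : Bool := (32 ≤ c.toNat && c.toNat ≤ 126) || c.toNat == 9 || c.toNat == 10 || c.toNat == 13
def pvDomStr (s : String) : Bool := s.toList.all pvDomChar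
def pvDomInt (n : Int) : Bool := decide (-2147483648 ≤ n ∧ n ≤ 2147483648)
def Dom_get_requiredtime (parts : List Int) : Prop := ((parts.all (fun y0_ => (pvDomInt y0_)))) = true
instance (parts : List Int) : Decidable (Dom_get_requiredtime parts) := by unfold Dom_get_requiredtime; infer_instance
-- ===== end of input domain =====

-- B replaces A's quadratic list-rebuilding loop with a single pass keeping a running prefix sum (faster).

-- ===== PORT A =====
-- the while loop: combine the first two elements, add their sum to the total, break when only two were left
def get_requiredtime_loop (total_time : Int) (remaining_parts : List Int) : Int :=
  match remaining_parts with
  | x1 :: x2 :: rest =>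
      if rest = [] then total_time + (x1 + x2)
      else get_requiredtime_loop (total_time + (x1 + x2)) ((x1 + x2) :: rest)
  | _ => total_time
termination_by remaining_parts.length

def get_requiredtime (parts : List Int) : Int :=
  get_requiredtime_loop 0 parts

-- ===== PORT B =====
def get_requiredtime_alt (parts : List Int) : Int :=
  match parts with
  | [] => 0
  | p0 :: rest =>
      (rest.foldl (fun (st : Int × Int) x => (st.1 + x, st.2 + (st.1 + x))) (p0, 0)).2

-- ===== PRECONDITION & SPEC =====
def Spec_get_requiredtime (parts : List Int) (out : Int) : Prop := out = get_requiredtime_alt parts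
instance (parts : List Int) (out : Int) : Decidable (Spec_get_requiredtime parts out) := by unfold Spec_get_requiredtime; infer_instance

-- ===== CLAIM (what is proved, stated in full; the proofs are below) =====
def Claim_equal_get_requiredtime : Prop := ∀ (parts : List Int), Dom_get_requiredtime parts → Spec_get_requiredtime parts (get_requiredtime parts)

-- ===== LEMMAS AND PROOFS =====

-- B's fold is affine in its accumulator's total component
theorem alt_fold_shift (xs : List Int) (r t : Int) :
    (xs.foldl (fun (st : Int × Int) x => (st.1 + x, st.2 + (st.1 + x))) (r, t)).2
      = t + (xs.foldl (fun (st : Int × Int) x => (st.1 + x, st.2 + (st.1 + x))) (r, 0)).2 := by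
  induction xs generalizing r t with
  | nil => simp
  | cons y ys ih =>
      simp only [List.foldl_cons]
      rw [ih (r + y) (t + (r + y)), ih (r + y) (0 + (r + y))]
      ring

-- A's loop on r :: xs equals total plus B's fold over xs started at running sum r
theorem loop_eq_fold (xs : List Int) (r t : Int) :
    get_requiredtime_loop t (r :: xs)
      = t + (xs.foldl (fun (st : Int × Int) x => (st.1 + x, st.2 + (st.1 + x))) (r, 0)).2 := by
  induction xs generalizing r t with
  | nil => rw [get_requiredtime_loop] <;> simp
  | cons y ys ih =>
      cases ys with
      | nil => rw [get_requiredtime_loop] <;> simp <;> ring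
      | cons z zs =>
          rw [show get_requiredtime_loop t (r :: y :: z :: zs)
                = get_requiredtime_loop (t + (r + y)) ((r + y) :: z :: zs) from by
              rw [get_requiredtime_loop] <;> simp]
          rw [ih (r + y) (t + (r + y))]
          conv_rhs => rw [List.foldl_cons]
          rw [alt_fold_shift (z :: zs) (r + y) (0 + (r + y))]
          ring

-- ===== VERDICT (by name: the statement is the Claim_ definition above) =====
theorem get_requiredtime_spec : Claim_equal_get_requiredtime := by
  intro parts _
  unfold Spec_get_requiredtime get_requiredtime get_requiredtime_alt
  cases parts with
  | nil => rw [get_requiredtime_loop] <;> simp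
  | cons p0 rest => rw [loop_eq_fold]; ring
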